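-- pv_equiv track=rewrite | github.com/Siddarth007th/Saul | saulgpt/saulgpt_api.py | _report_issue_observations
-- ===== SOURCE A (Python) =====
-- from typing import Any, Dict, List, Literal, Optional, Tuple
--
-- def _is_placeholder_value(value: Optional[str]) -> bool:
--     if not value:
--         return True
--     normalized = value.strip().lower()
--     placeholders = (
--         "not provided by user",
--         "not specified by user",
--         "timeline not fully specified by user",
--         "loss or amount not clearly specified",
--         "no document evidence specified by user",
--         "no witness information provided",
--         "desired outcome not clearly specified",
--         "no documentary evidence available yet",
--         "no witnesses identified",
--     )
--     return any(phrase in normalized for phrase in placeholders)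
--
-- def _report_issue_observations(category: str, slots: Dict[str, str]) -> List[str]:
--     observations: List[str] = []
--     if category == "Property or tenancy issue":
--         observations.append("- The matter appears to turn on possession or tenancy record, money trail, and move-out / notice chronology.")
--         if "deposit" in " ".join(str(slots.get(key, "")) for key in slots).lower():
--             observations.append("- Security deposit handling appears to be a central factual issue.")
--     elif category == "Employment dispute":
--         observations.append("- The matter appears to turn on proof of employment, work performed, and month-wise dues trail.")
--         observations.append("- Internal communication with HR or management is likely to be central.")
--     elif category == "Fraud or cheating concern":
--         observations.append("- The matter appears to turn on what representation was made, how it was relied on, and the resulting loss.")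
--         observations.append("- Identity trail and transaction chronology will likely carry significant weight.")
--     elif category == "Consumer issue":
--         observations.append("- The matter appears to turn on what was promised, what was delivered, and how the defect or deficiency was documented.")
--     elif category == "Cyber or online harm":
--         observations.append("- The matter appears to turn on digital traceability, transaction identifiers, and speed of evidence preservation.")
--     elif category == "Family or relationship dispute":
--         observations.append("- The matter appears to turn on relationship records, shared household or dependency history, and chronology of events.")
--     elif category == "Contract or payment dispute":
--         observations.append("- The matter appears to turn on the underlying promise, breach event, payment or performance trail, and measurable loss.")
--     else:
--         observations.append(f"- The matter appears to turn on {_category_key_factors(category)}.")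
--
--     if not _is_placeholder_value(slots.get("evidence")):
--         observations.append("- There is at least some documentary or digital material already identified in support of the case narrative.")
--     return observations
--
-- def _category_key_factors(category: str) -> str:
--     factors = {
--         "Property or tenancy issue": "possession, the written or oral tenancy/title record, payment trail, and communication around notice, deposit, or possession",
--         "Contract or payment dispute": "the promise made, proof of payment or performance, breach chronology, and measurable loss",
--         "Fraud or cheating concern": "what representation was made, how the user relied on it, the money or property trail, and evidence of deception",
--         "Consumer issue": "what was promised, what was delivered, when the defect was reported, and the complaint record",
--         "Employment dispute": "proof of employment, actual work performed, the pay or benefit trail, and employer communication",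
--         "Family or relationship dispute": "relationship records, timeline of events, financial dependence, living arrangement, and communication history",
--         "Cyber or online harm": "the digital trail, account or transaction identifiers, chronology of the incident, and preservation of raw evidence",
--         "Defamation or reputation issue": "what was said, where it was published, who saw it, and how the statement caused harm",
--         "Traffic or road incident": "the incident sequence, vehicle details, identity of persons involved, medical or repair records, and witness or camera material",
--         "FIR and police complaint": "clear chronology, identity details, seriousness of the allegation, immediate supporting material, and consistency of the complaint narrative",
--         "Bail and custody": "custody status, seriousness of allegations, personal ties, conduct record, and risk concerns around release",
--         "General criminal concern": "the allegation, timeline, available proof, witness support, and procedural safeguards",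
--     }
--     return factors.get(category, "the facts, the timeline, the documents, and whether the available material supports the user’s version clearly")
-- ===== SOURCE B (Python) =====
-- from typing import Dict, List, Optional
--
--
-- def _is_placeholder_value(value: Optional[str]) -> bool:
--     if not value:
--         return True
--     normalized = value.strip().lower()
--     placeholders = (
--         "not provided by user",
--         "not specified by user",
--         "timeline not fully specified by user",
--         "loss or amount not clearly specified",
--         "no document evidence specified by user",
--         "no witness information provided",
--         "desired outcome not clearly specified",
--         "no documentary evidence available yet",
--         "no witnesses identified",
--     )
--     return any(phrase in normalized for phrase in placeholders)
--
--
-- def _category_key_factors(category: str) -> str: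
--     factors = {
--         "Property or tenancy issue": "possession, the written or oral tenancy/title record, payment trail, and communication around notice, deposit, or possession",
--         "Contract or payment dispute": "the promise made, proof of payment or performance, breach chronology, and measurable loss",
--         "Fraud or cheating concern": "what representation was made, how the user relied on it, the money or property trail, and evidence of deception",
--         "Consumer issue": "what was promised, what was delivered, when the defect was reported, and the complaint record",
--         "Employment dispute": "proof of employment, actual work performed, the pay or benefit trail, and employer communication",
--         "Family or relationship dispute": "relationship records, timeline of events, financial dependence, living arrangement, and communication history",
--         "Cyber or online harm": "the digital trail, account or transaction identifiers, chronology of the incident, and preservation of raw evidence",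
--         "Defamation or reputation issue": "what was said, where it was published, who saw it, and how the statement caused harm",
--         "Traffic or road incident": "the incident sequence, vehicle details, identity of persons involved, medical or repair records, and witness or camera material",
--         "FIR and police complaint": "clear chronology, identity details, seriousness of the allegation, immediate supporting material, and consistency of the complaint narrative",
--         "Bail and custody": "custody status, seriousness of allegations, personal ties, conduct record, and risk concerns around release",
--         "General criminal concern": "the allegation, timeline, available proof, witness support, and procedural safeguards",
--     }
--     return factors.get(category, "the facts, the timeline, the documents, and whether the available material supports the user’s version clearly")
--
--
-- _HANDLED = (
--     "Property or tenancy issue",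
--     "Employment dispute",
--     "Fraud or cheating concern",
--     "Consumer issue",
--     "Cyber or online harm",
--     "Family or relationship dispute",
--     "Contract or payment dispute",
-- )
--
--
-- def _report_issue_observations(category: str, slots: Dict[str, str]) -> List[str]:
--     # Declarative rule table: each output line is a (fires, line) pair; the
--     # result is the lines whose condition fires, in rule order.
--     rules = [
--         (category == "Property or tenancy issue",
--          "- The matter appears to turn on possession or tenancy record, money trail, and move-out / notice chronology."),
--         (category == "Property or tenancy issue"
--          and any("deposit" in str(value).lower() for value in slots.values()),
--          "- Security deposit handling appears to be a central factual issue."),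
--         (category == "Employment dispute",
--          "- The matter appears to turn on proof of employment, work performed, and month-wise dues trail."),
--         (category == "Employment dispute",
--          "- Internal communication with HR or management is likely to be central."),
--         (category == "Fraud or cheating concern",
--          "- The matter appears to turn on what representation was made, how it was relied on, and the resulting loss."),
--         (category == "Fraud or cheating concern",
--          "- Identity trail and transaction chronology will likely carry significant weight."),
--         (category == "Consumer issue",
--          "- The matter appears to turn on what was promised, what was delivered, and how the defect or deficiency was documented."),
--         (category == "Cyber or online harm",
--          "- The matter appears to turn on digital traceability, transaction identifiers, and speed of evidence preservation."),
--         (category == "Family or relationship dispute",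
--          "- The matter appears to turn on relationship records, shared household or dependency history, and chronology of events."),
--         (category == "Contract or payment dispute",
--          "- The matter appears to turn on the underlying promise, breach event, payment or performance trail, and measurable loss."),
--         (category not in _HANDLED,
--          f"- The matter appears to turn on {_category_key_factors(category)}."),
--         (not _is_placeholder_value(slots.get("evidence")),
--          "- There is at least some documentary or digital material already identified in support of the case narrative."),
--     ]
--     return [line for fires, line in rules if fires]
-- ===== Notes on version B (the rewrite author's own statement) =====
-- stated objective: alternative
-- what changed: Replaces A's if/elif branch-and-append control flow by a declarative rule table of (condition, line) pairs — every output line, including the deposit and evidence lines, becomes one rule whose predicate is evaluated independently — and the result is a single filter pass over that table; the deposit substring scan runs per slot value instead of over one joined string.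
import Mathlib
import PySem

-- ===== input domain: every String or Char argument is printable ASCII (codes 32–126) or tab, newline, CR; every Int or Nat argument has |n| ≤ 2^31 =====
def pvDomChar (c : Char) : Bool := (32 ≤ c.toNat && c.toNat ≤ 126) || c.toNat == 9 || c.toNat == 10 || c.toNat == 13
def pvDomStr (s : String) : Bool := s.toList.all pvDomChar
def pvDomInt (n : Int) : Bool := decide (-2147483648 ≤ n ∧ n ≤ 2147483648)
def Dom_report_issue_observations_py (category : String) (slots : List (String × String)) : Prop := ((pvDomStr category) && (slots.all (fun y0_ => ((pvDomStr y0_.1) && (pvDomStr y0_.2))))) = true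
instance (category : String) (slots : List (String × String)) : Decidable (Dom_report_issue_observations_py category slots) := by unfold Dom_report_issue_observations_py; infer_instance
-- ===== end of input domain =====

-- B replaces A's if/elif branch-and-append control flow by a declarative rule table of
-- (condition, line) pairs filtered in one pass (objective: alternative).

-- ===== PORT A =====
-- shared helpers (identical in Source A and Source B): _is_placeholder_value and _category_key_factors
def pvPlaceholders : List String :=
  ["not provided by user",
   "not specified by user",
   "timeline not fully specified by user",
   "loss or amount not clearly specified",
   "no document evidence specified by user",
   "no witness information provided",
   "desired outcome not clearly specified",
   "no documentary evidence available yet",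
   "no witnesses identified"]

def pvIsPlaceholder (value : Option String) : Bool :=
  match value with
  | none => true
  | some v =>
    if v == "" then true
    else
      let normalized := PySem.Str.lower (PySem.Str.strip v)
      pvPlaceholders.any (fun phrase => PySem.Str.isIn phrase normalized)

def pvCategoryKeyFactors (category : String) : String :=
  (PySem.Dict.ofList
    [("Property or tenancy issue", "possession, the written or oral tenancy/title record, payment trail, and communication around notice, deposit, or possession"),
     ("Contract or payment dispute", "the promise made, proof of payment or performance, breach chronology, and measurable loss"),
     ("Fraud or cheating concern", "what representation was made, how the user relied on it, the money or property trail, and evidence of deception"),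
     ("Consumer issue", "what was promised, what was delivered, when the defect was reported, and the complaint record"),
     ("Employment dispute", "proof of employment, actual work performed, the pay or benefit trail, and employer communication"),
     ("Family or relationship dispute", "relationship records, timeline of events, financial dependence, living arrangement, and communication history"),
     ("Cyber or online harm", "the digital trail, account or transaction identifiers, chronology of the incident, and preservation of raw evidence"),
     ("Defamation or reputation issue", "what was said, where it was published, who saw it, and how the statement caused harm"),
     ("Traffic or road incident", "the incident sequence, vehicle details, identity of persons involved, medical or repair records, and witness or camera material"),
     ("FIR and police complaint", "clear chronology, identity details, seriousness of the allegation, immediate supporting material, and consistency of the complaint narrative"),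
     ("Bail and custody", "custody status, seriousness of allegations, personal ties, conduct record, and risk concerns around release"),
     ("General criminal concern", "the allegation, timeline, available proof, witness support, and procedural safeguards")]).getD
    category "the facts, the timeline, the documents, and whether the available material supports the user’s version clearly"

def report_issue_observations_py (category : String) (slots : List (String × String)) : List String :=
  let d := PySem.Dict.ofList slots
  let observations : List String := []
  let observations :=
    if category == "Property or tenancy issue" then
      let observations := observations ++ ["- The matter appears to turn on possession or tenancy record, money trail, and move-out / notice chronology."]
      if PySem.Str.isIn "deposit" (PySem.Str.lower (PySem.Str.join " " (d.keys.map (fun key => d.getD key "")))) then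
        observations ++ ["- Security deposit handling appears to be a central factual issue."]
      else observations
    else if category == "Employment dispute" then
      observations ++ ["- The matter appears to turn on proof of employment, work performed, and month-wise dues trail."]
        ++ ["- Internal communication with HR or management is likely to be central."]
    else if category == "Fraud or cheating concern" then
      observations ++ ["- The matter appears to turn on what representation was made, how it was relied on, and the resulting loss."]
        ++ ["- Identity trail and transaction chronology will likely carry significant weight."]
    else if category == "Consumer issue" then
      observations ++ ["- The matter appears to turn on what was promised, what was delivered, and how the defect or deficiency was documented."]
    else if category == "Cyber or online harm" then
      observations ++ ["- The matter appears to turn on digital traceability, transaction identifiers, and speed of evidence preservation."]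
    else if category == "Family or relationship dispute" then
      observations ++ ["- The matter appears to turn on relationship records, shared household or dependency history, and chronology of events."]
    else if category == "Contract or payment dispute" then
      observations ++ ["- The matter appears to turn on the underlying promise, breach event, payment or performance trail, and measurable loss."]
    else
      observations ++ ["- The matter appears to turn on " ++ pvCategoryKeyFactors category ++ "."]
  if !(pvIsPlaceholder (d.get? "evidence")) then
    observations ++ ["- There is at least some documentary or digital material already identified in support of the case narrative."]
  else observations

-- ===== PORT B =====
def pvHandled : List String :=
  ["Property or tenancy issue", "Employment dispute", "Fraud or cheating concern",
   "Consumer issue", "Cyber or online harm", "Family or relationship dispute",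
   "Contract or payment dispute"]

def report_issue_observations_py_alt (category : String) (slots : List (String × String)) : List String :=
  let d := PySem.Dict.ofList slots
  let rules : List (Bool × String) :=
    [(category == "Property or tenancy issue",
      "- The matter appears to turn on possession or tenancy record, money trail, and move-out / notice chronology."),
     (category == "Property or tenancy issue"
        && d.values.any (fun value => PySem.Str.isIn "deposit" (PySem.Str.lower value)),
      "- Security deposit handling appears to be a central factual issue."),
     (category == "Employment dispute",
      "- The matter appears to turn on proof of employment, work performed, and month-wise dues trail."),
     (category == "Employment dispute",
      "- Internal communication with HR or management is likely to be central."),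
     (category == "Fraud or cheating concern",
      "- The matter appears to turn on what representation was made, how it was relied on, and the resulting loss."),
     (category == "Fraud or cheating concern",
      "- Identity trail and transaction chronology will likely carry significant weight."),
     (category == "Consumer issue",
      "- The matter appears to turn on what was promised, what was delivered, and how the defect or deficiency was documented."),
     (category == "Cyber or online harm",
      "- The matter appears to turn on digital traceability, transaction identifiers, and speed of evidence preservation."),
     (category == "Family or relationship dispute",
      "- The matter appears to turn on relationship records, shared household or dependency history, and chronology of events."),
     (category == "Contract or payment dispute",
      "- The matter appears to turn on the underlying promise, breach event, payment or performance trail, and measurable loss."),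
     (!(pvHandled.contains category),
      "- The matter appears to turn on " ++ pvCategoryKeyFactors category ++ "."),
     (!(pvIsPlaceholder (d.get? "evidence")),
      "- There is at least some documentary or digital material already identified in support of the case narrative.")]
  (rules.filter (fun r => r.1)).map (fun r => r.2)

-- ===== PRECONDITION & SPEC =====
def Spec_report_issue_observations_py (category : String) (slots : List (String × String)) (out : List String) : Prop := out = report_issue_observations_py_alt category slots
instance (category : String) (slots : List (String × String)) (out : List String) : Decidable (Spec_report_issue_observations_py category slots out) := by unfold Spec_report_issue_observations_py; infer_instance

-- ===== CLAIM (what is proved, stated in full; the proofs are below) =====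
def Claim_equal_report_issue_observations_py : Prop := ∀ (category : String) (slots : List (String × String)), Dom_report_issue_observations_py category slots → Spec_report_issue_observations_py category slots (report_issue_observations_py category slots)

-- ===== LEMMAS AND PROOFS =====

-- a word not containing c and nonempty is a prefix of a ++ c :: b only through a
lemma pv_prefix_append_cons {c : Char} : ∀ (w a b : List Char), c ∉ w → w <+: a ++ c :: b → w <+: a := by
  intro w
  induction w with
  | nil => intro a b _ _; exact List.nil_prefix
  | cons y w' ih =>
    intro a b hc hp
    cases a with
    | nil =>
      exfalso
      rcases List.cons_prefix_cons.mp hp with ⟨rfl, _⟩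
      exact hc (List.mem_cons_self)
    | cons x a' =>
      rcases List.cons_prefix_cons.mp hp with ⟨rfl, hp'⟩
      exact List.cons_prefix_cons.mpr ⟨rfl, ih a' b (fun h => hc (List.mem_cons_of_mem _ h)) hp'⟩

lemma pv_infix_append_cons {c : Char} (w : List Char) (hw : w ≠ []) (hc : c ∉ w) :
    ∀ (a b : List Char), (w <:+: a ++ c :: b ↔ w <:+: a ∨ w <:+: b) := by
  intro a
  induction a with
  | nil =>
    intro b
    simp only [List.nil_append]
    constructor
    · intro h
      rcases (List.infix_cons_iff).mp h with hpre | hinf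
      · exfalso
        cases w with
        | nil => exact hw rfl
        | cons y w' =>
          rcases List.cons_prefix_cons.mp hpre with ⟨rfl, _⟩
          exact hc List.mem_cons_self
      · exact Or.inr hinf
    · rintro (h | h)
      · rw [List.infix_nil] at h; exact absurd h hw
      · exact h.trans (List.suffix_cons c b).isInfix
  | cons x a' ih =>
    intro b
    rw [List.cons_append, List.infix_cons_iff, List.infix_cons_iff]
    constructor
    · rintro (hpre | hinf)
      · left; left
        exact pv_prefix_append_cons w (x :: a') b hc (by simpa using hpre)
      · rcases (ih b).mp hinf with h | h
        · exact Or.inl (Or.inr h)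
        · exact Or.inr h
    · rintro ((hpre | hinf) | h)
      · exact Or.inl (hpre.trans (List.prefix_append (x :: a') (c :: b)))
      · exact Or.inr ((ih b).mpr (Or.inl hinf))
      · exact Or.inr ((ih b).mpr (Or.inr h))

-- a space-free nonempty word occurs in ' '-joined parts iff it occurs in some part
lemma pv_isIn_join (w : List Char) (hw : w ≠ []) (hc : (' ' : Char) ∉ w) :
    ∀ (L : List (List Char)), PySem.Chars.isIn w (PySem.Chars.join [' '] L) = L.any (fun p => PySem.Chars.isIn w p) := by
  intro L
  induction L with
  | nil =>
    simp only [PySem.Chars.join_nil, List.any_nil]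
    rw [Bool.eq_false_iff, Ne, PySem.Chars.isIn_iff_infix, List.infix_nil]
    exact hw
  | cons p rest ih =>
    cases rest with
    | nil => simp [PySem.Chars.join_singleton]
    | cons q rest' =>
      rw [PySem.Chars.join_cons_cons]
      have h1 : p ++ [' '] ++ PySem.Chars.join [' '] (q :: rest') = p ++ ' ' :: PySem.Chars.join [' '] (q :: rest') := by
        simp
      rw [h1, Bool.eq_iff_iff, PySem.Chars.isIn_iff_infix, pv_infix_append_cons w hw hc]
      simp only [List.any_cons, Bool.or_eq_true, ← ih, PySem.Chars.isIn_iff_infix]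

lemma pv_lower_join (L : List (List Char)) :
    PySem.Chars.lower (PySem.Chars.join [' '] L) = PySem.Chars.join [' '] (L.map PySem.Chars.lower) := by
  induction L with
  | nil => simp [PySem.Chars.join_nil, PySem.Chars.lower]
  | cons p rest ih =>
    cases rest with
    | nil => simp [PySem.Chars.join_singleton]
    | cons q rest' =>
      have hmap : ∀ cs : List Char, PySem.Chars.lower cs = cs.map PySem.Chars.lowerChar := fun _ => rfl
      simp only [List.map_cons]
      rw [PySem.Chars.join_cons_cons, PySem.Chars.join_cons_cons, hmap, List.map_append,
        List.map_append, ← hmap, ← hmap, ← hmap, ih]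
      rw [show PySem.Chars.lower [' '] = [' '] from rfl]
      simp [List.map_cons]

-- the deposit scans of the two ports agree on every dict
lemma pv_deposit_eq (d : PySem.Dict String String) (hnd : d.keys.Nodup) :
    PySem.Str.isIn "deposit" (PySem.Str.lower (PySem.Str.join " " (d.keys.map (fun key => d.getD key "")))) =
      d.values.any (fun value => PySem.Str.isIn "deposit" (PySem.Str.lower value)) := by
  rw [← PySem.Dict.values_eq_map_keys d hnd ""]
  rw [show (PySem.Str.isIn "deposit" (PySem.Str.lower (PySem.Str.join " " d.values)) =
      PySem.Chars.isIn "deposit".toList (PySem.Str.lower (PySem.Str.join " " d.values)).toList) from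
    PySem.Str.isIn_eq _ _]
  rw [PySem.Str.toList_lower, PySem.Str.toList_join]
  have hsep : (" " : String).toList = [' '] := rfl
  rw [hsep, pv_lower_join, pv_isIn_join "deposit".toList (by decide) (by decide)]
  rw [List.map_map, List.any_map]
  apply PySem.List.any_congr_mem
  intro v _
  rw [show (PySem.Str.isIn "deposit" (PySem.Str.lower v) =
      PySem.Chars.isIn "deposit".toList (PySem.Str.lower v).toList) from PySem.Str.isIn_eq _ _]
  rw [PySem.Str.toList_lower]
  rfl

-- ===== VERDICT (by name: the statement is the Claim_ definition above) =====
theorem report_issue_observations_py_spec : Claim_equal_report_issue_observations_py := by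
  intro category slots _
  unfold Spec_report_issue_observations_py report_issue_observations_py report_issue_observations_py_alt
  dsimp only
  rw [pv_deposit_eq _ (PySem.Dict.nodup_keys_ofList slots)]
  set dep := (PySem.Dict.ofList slots).values.any (fun value => PySem.Str.isIn "deposit" (PySem.Str.lower value)) with hdep
  set ev := pvIsPlaceholder ((PySem.Dict.ofList slots).get? "evidence") with hev
  by_cases h1 : category = "Property or tenancy issue"
  · subst h1; cases dep <;> cases ev <;> simp [pvHandled, List.filter]
  · by_cases h2 : category = "Employment dispute"
    · subst h2; cases dep <;> cases ev <;> simp [pvHandled, List.filter]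
    · by_cases h3 : category = "Fraud or cheating concern"
      · subst h3; cases dep <;> cases ev <;> simp [pvHandled, List.filter]
      · by_cases h4 : category = "Consumer issue"
        · subst h4; cases dep <;> cases ev <;> simp [pvHandled, List.filter]
        · by_cases h5 : category = "Cyber or online harm"
          · subst h5; cases dep <;> cases ev <;> simp [pvHandled, List.filter]
          · by_cases h6 : category = "Family or relationship dispute"
            · subst h6; cases dep <;> cases ev <;> simp [pvHandled, List.filter]
            · by_cases h7 : category = "Contract or payment dispute"
              · subst h7; cases dep <;> cases ev <;> simp [pvHandled, List.filter]
              · have b1 : (category == "Property or tenancy issue") = false := beq_eq_false_iff_ne.mpr h1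
                have b2 : (category == "Employment dispute") = false := beq_eq_false_iff_ne.mpr h2
                have b3 : (category == "Fraud or cheating concern") = false := beq_eq_false_iff_ne.mpr h3
                have b4 : (category == "Consumer issue") = false := beq_eq_false_iff_ne.mpr h4
                have b5 : (category == "Cyber or online harm") = false := beq_eq_false_iff_ne.mpr h5
                have b6 : (category == "Family or relationship dispute") = false := beq_eq_false_iff_ne.mpr h6
                have b7 : (category == "Contract or payment dispute") = false := beq_eq_false_iff_ne.mpr h7
                cases dep <;> cases ev <;>
                  simp [pvHandled, List.filter, h1, h2, h3, h4, h5, h6, h7, b1, b2, b3, b4, b5, b6, b7]
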